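-- pv_equiv track=rewrite | github.com/steffiindrayani/automated_news_generator | src/document_planning.py | orderContentByEntity
-- ===== SOURCE A (Python) =====
-- import collections
--
-- def orderContentByEntity(contentsList):
--     results = []
--     for contents in contentsList:
--         result = collections.defaultdict(list)
--         for content in contents:
--             result[content['entity']].append(content)
--         results.extend(result.values())
--     return results
-- ===== SOURCE B (Python) =====
-- def orderContentByEntity(contentsList):
--     results = []
--     for contents in contentsList:
--         entities = []
--         for content in contents:
--             e = content['entity']
--             if e not in entities:
--                 entities.append(e)
--         for e in entities:
--             results.append([c for c in contents if c['entity'] == e])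
--     return results
-- ===== Notes on version B (the rewrite author's own statement) =====
-- stated objective: alternative
-- what changed: Replaces the defaultdict grouping (one dict of growing lists per inner list, then its values) by an explicit two-phase decomposition: first collect the distinct entities in first-appearance order, then emit each group as a filter of the inner list.
import Mathlib
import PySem

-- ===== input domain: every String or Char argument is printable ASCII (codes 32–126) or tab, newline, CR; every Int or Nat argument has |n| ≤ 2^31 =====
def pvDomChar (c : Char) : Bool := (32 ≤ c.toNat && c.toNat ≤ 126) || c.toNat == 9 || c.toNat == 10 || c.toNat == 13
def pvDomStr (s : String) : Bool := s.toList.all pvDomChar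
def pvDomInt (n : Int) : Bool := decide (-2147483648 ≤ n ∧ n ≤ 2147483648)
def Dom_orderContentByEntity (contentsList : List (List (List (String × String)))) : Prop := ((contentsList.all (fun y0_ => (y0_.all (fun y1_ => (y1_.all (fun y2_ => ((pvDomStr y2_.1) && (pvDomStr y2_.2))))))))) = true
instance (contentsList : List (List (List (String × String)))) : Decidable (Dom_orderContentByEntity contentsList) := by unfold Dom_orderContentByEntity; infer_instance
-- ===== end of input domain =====

-- B replaces A's defaultdict grouping by two explicit phases: distinct entities in first-appearance
-- order, then one filter per entity (objective: alternative decomposition, same results).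

-- shared dict-lookup helper: content['entity'] with default "" (Pre_ excludes the KeyError case)
def pvEntity (content : List (String × String)) : String :=
  (PySem.Dict.mk content).getD "entity" ""

-- ===== PORT A =====
def orderContentByEntity (contentsList : List (List (List (String × String)))) : List (List (List (String × String))) :=
  contentsList.foldl
    (fun results contents =>
      results ++ (contents.foldl
        (fun d content => d.modify (pvEntity content) [] (· ++ [content]))
        PySem.Dict.empty).values)
    []

-- ===== PORT B =====
def orderContentByEntity_alt (contentsList : List (List (List (String × String)))) : List (List (List (String × String))) :=
  contentsList.foldl
    (fun results contents =>
      let entities := contents.foldl (fun es content => PySem.Set.add es (pvEntity content)) []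
      results ++ entities.map (fun e => contents.filter (fun c => pvEntity c == e)))
    []

-- ===== PRECONDITION & SPEC =====
-- Pre_ excludes exactly the inputs where some content dict lacks the key 'entity', on which A raises KeyError.
def Pre_orderContentByEntity (contentsList : List (List (List (String × String)))) : Prop :=
  (contentsList.all (fun contents => contents.all (fun c => c.any (fun p => p.1 == "entity")))) = true
instance (contentsList : List (List (List (String × String)))) : Decidable (Pre_orderContentByEntity contentsList) := by unfold Pre_orderContentByEntity; infer_instance

def pvWitness_orderContentByEntity : (List (List (List (String × String)))) :=
  [[[("entity", "a"), ("t", "x")], [("entity", "b")], [("entity", "a"), ("t", "y")]], []]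

def Spec_orderContentByEntity (contentsList : List (List (List (String × String)))) (out : List (List (List (String × String)))) : Prop := out = orderContentByEntity_alt contentsList
instance (contentsList : List (List (List (String × String)))) (out : List (List (List (String × String)))) : Decidable (Spec_orderContentByEntity contentsList out) := by unfold Spec_orderContentByEntity; infer_instance

-- ===== CLAIM (what is proved, stated in full; the proofs are below) =====
def Claim_equal_orderContentByEntity : Prop := ∀ (contentsList : List (List (List (String × String)))), Dom_orderContentByEntity contentsList → Pre_orderContentByEntity contentsList → Spec_orderContentByEntity contentsList (orderContentByEntity contentsList)

-- ===== LEMMAS AND PROOFS =====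

-- per inner list: the values of A's grouping dict are exactly B's filters over the distinct entities
lemma pvGroup_eq (contents : List (List (String × String))) :
    (contents.foldl (fun d content => d.modify (pvEntity content) [] (· ++ [content]))
      PySem.Dict.empty).values
    = (contents.foldl (fun es content => PySem.Set.add es (pvEntity content)) []).map
        (fun e => contents.filter (fun c => pvEntity c == e)) := by
  have hfold : contents.foldl (fun d content => d.modify (pvEntity content) [] (· ++ [content]))
      PySem.Dict.empty
      = (contents.map (fun c => (pvEntity c, c))).foldl
          (fun d p => d.modify p.1 [] (· ++ [p.2])) PySem.Dict.empty := by
    rw [List.foldl_map]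
  set D := contents.foldl (fun d content => d.modify (pvEntity content) [] (· ++ [content])) PySem.Dict.empty with hD
  have hnd : D.keys.Nodup := by
    rw [hD]
    exact PySem.Dict.nodup_keys_foldl_modify_key contents pvEntity [] (fun d x => (· ++ [x])) _ PySem.Dict.nodup_keys_empty
  have hkeys : D.keys = contents.foldl (fun es content => PySem.Set.add es (pvEntity content)) [] := by
    rw [hD, PySem.Dict.keys_foldl_modify_key, PySem.Dict.keys_empty,
        ← PySem.Set.update_map_eq_foldl_add, PySem.Set.update_nil_left]
  have hget : ∀ e, D.getD e [] = contents.filter (fun c => pvEntity c == e) := by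
    intro e
    rw [hD] at hfold ⊢
    rw [hfold, PySem.Dict.getD_foldl_modify_append, PySem.Dict.getD_empty,
        List.filter_map, List.map_map]
    simp [Function.comp_def]
  rw [PySem.Dict.values_eq_map_keys D hnd [], hkeys]
  exact List.map_congr_left (fun e _ => hget e)

lemma pvOuter_eq (contentsList : List (List (List (String × String)))) :
    ∀ acc : List (List (List (String × String))),
      contentsList.foldl
        (fun results contents =>
          results ++ (contents.foldl
            (fun d content => d.modify (pvEntity content) [] (· ++ [content]))
            PySem.Dict.empty).values) acc
      = contentsList.foldl
          (fun results contents =>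
            let entities := contents.foldl (fun es content => PySem.Set.add es (pvEntity content)) []
            results ++ entities.map (fun e => contents.filter (fun c => pvEntity c == e))) acc := by
  induction contentsList with
  | nil => intro acc; rfl
  | cons contents rest ih =>
      intro acc
      simp only [List.foldl_cons]
      rw [pvGroup_eq contents]
      exact ih _

theorem orderContentByEntity_spec : Claim_equal_orderContentByEntity := by
  intro contentsList _ _
  unfold Spec_orderContentByEntity orderContentByEntity orderContentByEntity_alt
  exact pvOuter_eq contentsList []
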